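-- pv_equiv track=rewrite | github.com/XyzHuy/-DL-Fine-tuning-coding-model | data/solution/Solution1505.py | minInteger
-- ===== SOURCE A (Python) =====
-- def minInteger(num: str, k: int) -> str:
--     num = list(num)
--     n = len(num)
--
--     for i in range(n):
--         # Find the smallest digit we can move to the i-th position
--         min_digit = num[i]
--         min_index = i
--
--         # Check up to k positions ahead to find the smallest digit
--         for j in range(i + 1, min(n, i + k + 1)):
--             if num[j] < min_digit:
--                 min_digit = num[j]
--                 min_index = j
--
--         # Calculate the number of swaps needed to move num[min_index] to position i
--         swaps_needed = min_index - i
--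
--         # If we have enough swaps, perform them
--         if swaps_needed <= k:
--             # Move the digit to the i-th position
--             num = num[:i] + [num[min_index]] + num[i:min_index] + num[min_index+1:]
--             # Decrease the number of swaps left
--             k -= swaps_needed
--
--         # If k is 0, we can't make any more swaps, so we can break early
--         if k == 0:
--             break
--
--     # Convert the list back to a string and return it
--     return ''.join(num)
-- ===== SOURCE B (Python) =====
-- def minInteger(num: str, k: int) -> str:
--     # Per-character position queues: pick the smallest character whose first
--     # remaining occurrence can be pulled to the front within the budget; the
--     # shifted cost of an original index is the index minus removals before it.
--     n = len(num)
--     if k <= 0: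
--         return num
--     queues = [[] for _ in range(128)]
--     for i in range(n):
--         queues[ord(num[i])].append(i)
--     removed = []
--     out = []
--     while len(out) < n and k > 0:
--         for code in range(128):
--             q = queues[code]
--             if not q:
--                 continue
--             idx = q[0]
--             if k < idx - len(removed):
--                 continue  # cost is at least idx - len(removed): cannot qualify
--             cost = idx - sum(1 for r in removed if r < idx)
--             if cost <= k:
--                 del q[0]
--                 removed.append(idx)
--                 out.append(chr(code))
--                 k -= cost
--                 break
--     if len(out) < n:
--         gone = set(removed)
--         out.extend(num[i] for i in range(n) if i not in gone)
--     return ''.join(out)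
-- ===== Notes on version B (the rewrite author's own statement) =====
-- stated objective: alternative
-- what changed: Replaces A's repeated window scan over positions plus four-slice list rebuilding by per-character position queues built once: each step scans character codes in increasing order, takes the first queue whose head index has shifted cost (original index minus removals before it) within budget, and marks that index removed instead of rebuilding the list.
import Mathlib
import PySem

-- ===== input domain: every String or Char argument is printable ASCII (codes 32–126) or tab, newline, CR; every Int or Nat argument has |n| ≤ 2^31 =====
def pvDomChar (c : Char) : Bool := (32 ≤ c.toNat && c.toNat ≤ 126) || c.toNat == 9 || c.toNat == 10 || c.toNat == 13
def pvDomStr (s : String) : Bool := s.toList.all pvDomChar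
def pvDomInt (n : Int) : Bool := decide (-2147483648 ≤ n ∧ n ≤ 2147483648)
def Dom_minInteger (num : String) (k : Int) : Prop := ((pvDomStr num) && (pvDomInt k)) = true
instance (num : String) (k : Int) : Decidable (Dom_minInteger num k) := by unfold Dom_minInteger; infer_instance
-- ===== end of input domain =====

-- B replaces A's repeated window scan + four-slice list rebuilding by per-character position
-- queues built once; each step takes the smallest character code whose first remaining index
-- has shifted cost (index minus removals before it) within budget. Alternative algorithm.


-- ===== PORT A =====
-- helper: body of the inner `if num[j] < min_digit:` comparison
def minIntegerStep (num : List Char) (s : Char × Int) (j : Int) : Char × Int :=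
  if (PySem.List.pyGet? num j).getD ' ' < s.1 then ((PySem.List.pyGet? num j).getD ' ', j) else s

def minIntegerScanRes (n : Int) (num : List Char) (k i : Int) : Char × Int :=
  (PySem.List.pyRange (i+1) (min n (i+k+1)) 1).foldl (minIntegerStep num)
    ((PySem.List.pyGet? num i).getD ' ', i)

-- one iteration of the outer loop: the new (num, k)
def minIntegerBody (n : Int) (num : List Char) (k i : Int) : List Char × Int :=
  if (minIntegerScanRes n num k i).2 - i ≤ k then
    (PySem.List.slice num none (some i) ++ [(PySem.List.pyGet? num (minIntegerScanRes n num k i).2).getD ' ']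
      ++ PySem.List.slice num (some i) (some (minIntegerScanRes n num k i).2)
      ++ PySem.List.slice num (some ((minIntegerScanRes n num k i).2 + 1)) none,
     k - ((minIntegerScanRes n num k i).2 - i))
  else (num, k)

def minIntegerLoop (n : Int) (num : List Char) (k : Int) (i : Int) : Nat → List Char
  | 0 => num
  | fuel + 1 =>
    if (minIntegerBody n num k i).2 = 0 then (minIntegerBody n num k i).1
    else minIntegerLoop n (minIntegerBody n num k i).1 (minIntegerBody n num k i).2 (i+1) fuel

def minInteger (num : String) (k : Int) : String :=
  String.ofList (minIntegerLoop (num.toList.length : Int) num.toList k 0 num.toList.length)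

-- ===== PORT B =====
-- num[i]
def altAt (cs : List Char) (i : Int) : Char := (PySem.List.pyGet? cs i).getD ' '

-- for i in range(n): queues[ord(num[i])].append(i)
def altBuild (cs : List Char) : List (List Int) :=
  (PySem.List.pyRange 0 (cs.length : Int) 1).foldl
    (fun qs i => qs.modify (altAt cs i).toNat (fun q => q ++ [i]))
    (List.replicate 128 [])

-- the inner `for code in range(128): … break`: first qualifying (code, idx, cost)
def altScan (qs : List (List Int)) (removed : List Int) (k : Int) : List Int → Option (Int × Int × Int)
  | [] => none
  | code :: codes =>
    match (PySem.List.pyGet? qs code).getD [] with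
    | [] => altScan qs removed k codes
    | idx :: _ =>
      if k < idx - (removed.length : Int) then altScan qs removed k codes
      else if idx - ((removed.filter (fun r => decide (r < idx))).length : Int) ≤ k then
        some (code, idx, idx - ((removed.filter (fun r => decide (r < idx))).length : Int))
      else altScan qs removed k codes

-- while len(out) < n and k > 0: pick, mark removed, spend the cost
def altLoop (n : Int) : Nat → List (List Int) → List Int → List Char → Int → List Int × List Char
  | 0, _, removed, out, _ => (removed, out)
  | fuel + 1, qs, removed, out, k =>
    if (out.length : Int) < n ∧ 0 < k then
      match altScan qs removed k (PySem.List.pyRange 0 128 1) with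
      | some (code, idx, cost) =>
          altLoop n fuel (qs.modify code.toNat List.tail) (removed ++ [idx])
            (out ++ [Char.ofNat code.toNat]) (k - cost)
      | none => altLoop n fuel qs removed out k
    else (removed, out)

def minInteger_alt (num : String) (k : Int) : String :=
  if k ≤ 0 then num
  else
    let r := altLoop (num.toList.length : Int) num.toList.length (altBuild num.toList) [] [] k
    if (r.2.length : Int) < (num.toList.length : Int) then
      String.ofList (r.2 ++ ((PySem.List.pyRange 0 (num.toList.length : Int) 1).filter
        (fun i => !(PySem.Set.contains (PySem.Set.ofList r.1) i))).map (fun i => altAt num.toList i))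
    else String.ofList r.2

-- ===== PRECONDITION & SPEC =====
def Spec_minInteger (num : String) (k : Int) (out : String) : Prop := out = minInteger_alt num k
instance (num : String) (k : Int) (out : String) : Decidable (Spec_minInteger num k out) := by unfold Spec_minInteger; infer_instance

-- ===== CLAIM (what is proved, stated in full; the proofs are below) =====
def Claim_equal_minInteger : Prop := ∀ (num : String) (k : Int), Dom_minInteger num k → Spec_minInteger num k (minInteger num k)

-- ===== LEMMAS AND PROOFS =====

-- proof-side model of the greedy: window of the first k+1 remaining characters
def pvWindow (digits : List Char) (k : Int) : List Char :=
  PySem.List.slice digits none (some (k+1))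
def pvM (digits : List Char) (k : Int) : Char :=
  (PySem.List.min? (pvWindow digits k) (fun y => y)).getD ' '
def pvJ (digits : List Char) (k : Int) : Nat :=
  (PySem.List.index? (pvWindow digits k) (pvM digits k)).getD 0

def pvGoB (digits : List Char) (k : Int) (out : List Char) : List Char :=
  if digits ≠ [] ∧ 0 < k then
    match hp : PySem.List.pop? digits ((pvJ digits k : Nat) : Int) with
    | some r => pvGoB r.2 (k - (pvJ digits k : Nat)) (out ++ [pvM digits k])
    | none => out ++ digits
  else out ++ digits
termination_by digits.length
decreasing_by
  have := PySem.List.length_of_pop?_eq_some digits hp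
  omega

-- ---- A's loop equals pvGoB (window greedy on the remaining suffix) ----

-- proof-side model of A's inner scan: leftmost strict minimum, tracking (value, absolute index)
def lmin2 : List Char → Char × Int → Int → Char × Int
  | [], s, _ => s
  | c :: cs, s, p => lmin2 cs (if c < s.1 then (c, p) else s) (p + 1)

lemma foldl_min_le_init : ∀ (ds : List Char) (x : Char), ds.foldl min x ≤ x := by
  intro ds
  induction ds with
  | nil => intro x; simp
  | cons d ds ih =>
    intro x
    calc (d :: ds).foldl min x = ds.foldl min (min x d) := by simp [List.foldl]
    _ ≤ min x d := ih _
    _ ≤ x := min_le_left _ _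

lemma lmin2_char : ∀ (ds : List Char) (md : Char) (mi p : Int),
    lmin2 ds (md, mi) p =
      if ds.foldl min md < md then
        (ds.foldl min md, p + (List.idxOf (ds.foldl min md) ds : Int))
      else (md, mi) := by
  intro ds
  induction ds with
  | nil => intro md mi p; simp [lmin2]
  | cons d ds ih =>
    intro md mi p
    simp only [lmin2, List.foldl_cons]
    by_cases h : d < md
    · simp only [if_pos h]
      rw [ih d p (p+1)]
      have hmd : min md d = d := min_eq_right h.le
      rw [hmd]
      have hle : ds.foldl min d ≤ d := foldl_min_le_init ds d
      by_cases h2 : ds.foldl min d < d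
      · rw [if_pos h2, if_pos (lt_trans h2 h)]
        have hne : ds.foldl min d ≠ d := ne_of_lt h2
        rw [List.idxOf_cons_ne _ (fun hc => hne hc.symm)]
        refine Prod.ext rfl ?_; push_cast [Nat.succ_eq_add_one]; ring
      · have heq : ds.foldl min d = d := le_antisymm hle (not_lt.1 h2)
        rw [if_neg h2, heq, if_pos h, List.idxOf_cons_self]
        simp
    · simp only [if_neg h]
      rw [ih md mi (p+1)]
      have hmd : min md d = md := min_eq_left (not_lt.1 h)
      rw [hmd]
      by_cases h2 : ds.foldl min md < md
      · rw [if_pos h2, if_pos h2]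
        have hne : ds.foldl min md ≠ d := ne_of_lt (lt_of_lt_of_le h2 (not_lt.1 h))
        rw [List.idxOf_cons_ne _ (fun hc => hne hc.symm)]
        refine Prod.ext rfl ?_; push_cast [Nat.succ_eq_add_one]; ring
      · rw [if_neg h2, if_neg h2]

lemma pyGet_mid (pre suf : List Char) (d : Char) :
    (PySem.List.pyGet? (pre ++ d :: suf) (pre.length : Int)).getD ' ' = d := by
  rw [PySem.List.pyGet?_natCast]
  rw [List.getElem?_append_right (le_refl _)]
  simp

lemma pyGet_abs (pre t : List Char) (jj : Nat) (h : jj < t.length) :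
    (PySem.List.pyGet? (pre ++ t) ((pre.length + jj : Nat) : Int)).getD ' ' = t[jj] := by
  rw [PySem.List.pyGet?_natCast]
  rw [List.getElem?_append_right (by omega)]
  simp [h]

lemma scanA : ∀ (ds pre suf : List Char) (s : Char × Int),
    (PySem.List.pyRange (pre.length : Int) ((pre.length : Int) + (ds.length : Int)) 1).foldl
        (minIntegerStep (pre ++ (ds ++ suf))) s
      = lmin2 ds s (pre.length : Int) := by
  intro ds
  induction ds with
  | nil => intro pre suf s; simp [PySem.List.pyRange_one_eq_nil, lmin2]
  | cons d ds ih =>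
    intro pre suf s
    simp only [List.length_cons, Nat.cast_add, Nat.cast_one]
    rw [show (pre.length : Int) + ((ds.length : Int) + 1) = (pre.length : Int) + 1 + (ds.length : Int) by ring]
    rw [PySem.List.pyRange_one_cons (by omega)]
    rw [List.foldl_cons]
    have h1 : minIntegerStep (pre ++ (d :: ds ++ suf)) s (pre.length : Int)
        = if d < s.1 then (d, (pre.length : Int)) else s := by
      unfold minIntegerStep
      rw [show pre ++ (d :: ds ++ suf) = pre ++ d :: (ds ++ suf) by simp]
      rw [pyGet_mid]
    rw [h1]
    have h2 := ih (pre ++ [d]) suf (if d < s.1 then (d, (pre.length : Int)) else s)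
    have hl : ((pre ++ [d]).length : Int) = (pre.length : Int) + 1 := by simp
    rw [hl] at h2
    rw [show (pre ++ [d]) ++ (ds ++ suf) = pre ++ (d :: ds ++ suf) by simp] at h2
    rw [h2]
    simp [lmin2]

lemma scan_neg (n : Int) (num : List Char) (k i : Int) (h : k < 0) :
    minIntegerScanRes n num k i = ((PySem.List.pyGet? num i).getD ' ', i) := by
  unfold minIntegerScanRes
  rw [PySem.List.pyRange_one_eq_nil (by omega : min n (i+k+1) ≤ i + 1)]
  rfl

lemma loopA_neg : ∀ (fuel : Nat) (n : Int) (num : List Char) (k i : Int), k < 0 →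
    minIntegerLoop n num k i fuel = num := by
  intro fuel
  induction fuel with
  | zero => intro n num k i h; rfl
  | succ fuel ih =>
    intro n num k i h
    have hb : minIntegerBody n num k i = (num, k) := by
      unfold minIntegerBody
      rw [scan_neg n num k i h, if_neg (by simp; omega)]
    rw [minIntegerLoop, hb, if_neg (by simp; omega)]
    exact ih n num k (i+1) h

lemma idxOf?_mem {a : Char} {l : List Char} (h : a ∈ l) : List.idxOf? a l = some (List.idxOf a l) := by
  cases ho : List.idxOf? a l with
  | none => exact absurd (List.idxOf?_eq_none_iff.mp ho) (by simpa using h)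
  | some v => rw [List.idxOf_eq_getD_idxOf?, ho]; rfl

lemma goB_not (digits out : List Char) (k : Int) (h : ¬ (digits ≠ [] ∧ 0 < k)) :
    pvGoB digits k out = out ++ digits := by
  rw [pvGoB, if_neg h]

lemma goB_step (c : Char) (cs out : List Char) (k : Int) (hk : 0 < k) :
    pvGoB (c :: cs) k out =
      pvGoB ((c :: cs).eraseIdx (List.idxOf ((cs.take k.toNat).foldl min c) (c :: cs.take k.toNat)))
        (k - (List.idxOf ((cs.take k.toNat).foldl min c) (c :: cs.take k.toNat) : Nat))
        (out ++ [(cs.take k.toNat).foldl min c]) := by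
  have hwin : pvWindow (c :: cs) k = c :: cs.take k.toNat := by
    unfold pvWindow
    rw [PySem.List.slice_to (c :: cs) (by omega : (0:Int) ≤ k + 1)]
    rw [show (k+1).toNat = k.toNat + 1 by omega]
    exact List.take_succ_cons
  set m := (cs.take k.toNat).foldl min c with hm
  set w := c :: cs.take k.toNat with hw
  have hmv : pvM (c :: cs) k = m := by
    unfold pvM; rw [hwin, PySem.List.min?_id_cons, Option.getD_some, hm]
  have hminw : PySem.List.min? w (fun y => y) = some m := by
    rw [hw, hm]; exact PySem.List.min?_id_cons c _
  have hmem : m ∈ w := PySem.List.min?_mem hminw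
  have hjv : pvJ (c :: cs) k = List.idxOf m w := by
    unfold pvJ; rw [hwin, hmv, PySem.List.index?_eq_idxOf?, idxOf?_mem hmem, Option.getD_some]
  have hJlt : List.idxOf m w < (c :: cs).length := by
    have h1 : List.idxOf m w < w.length := List.idxOf_lt_length_iff.mpr hmem
    have h2 : w.length ≤ (c :: cs).length := by
      rw [hw]; simp only [List.length_cons, Nat.add_le_add_iff_right]
      simp [List.length_take]
    omega
  have hpop := PySem.List.pop?_natCast (c :: cs) (List.idxOf m w) hJlt
  rw [pvGoB, if_pos ⟨by simp, hk⟩]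
  split
  next r hp =>
    rw [hjv, hpop] at hp
    cases hp
    rw [hjv, hmv]
  next hp =>
    rw [hjv, hpop] at hp
    cases hp

lemma main_corr : ∀ (fuel : Nat) (rest out : List Char) (k : Int), rest.length = fuel →
    minIntegerLoop ((out.length + rest.length : Nat) : Int) (out ++ rest) k (out.length : Int) fuel
      = pvGoB rest k out := by
  intro fuel
  induction fuel with
  | zero =>
    intro rest out k hlen
    have h0 : rest = [] := List.eq_nil_of_length_eq_zero hlen
    subst h0
    rw [goB_not _ _ _ (by simp)]
    rfl
  | succ fuel ih =>
    intro rest out k hlen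
    obtain ⟨c, cs, rfl⟩ : ∃ c cs, rest = c :: cs := by
      cases rest with
      | nil => simp at hlen
      | cons c cs => exact ⟨c, cs, rfl⟩
    have hcs : cs.length = fuel := by simpa using hlen
    rcases lt_trichotomy k 0 with hk | hk | hk
    · rw [loopA_neg _ _ _ _ _ hk, goB_not _ _ _ (by rintro ⟨_, h⟩; omega)]
    · -- k = 0
      subst hk
      have hscan : minIntegerScanRes ((out.length + (c :: cs).length : Nat) : Int)
          (out ++ c :: cs) 0 (out.length : Int)
          = ((PySem.List.pyGet? (out ++ c :: cs) (out.length : Int)).getD ' ', (out.length : Int)) := by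
        unfold minIntegerScanRes
        rw [PySem.List.pyRange_one_eq_nil (by omega)]
        rfl
      have hbody : minIntegerBody ((out.length + (c :: cs).length : Nat) : Int)
          (out ++ c :: cs) 0 (out.length : Int) = (out ++ c :: cs, 0) := by
        unfold minIntegerBody
        rw [hscan, if_pos (by simp)]
        show (PySem.List.slice (out ++ c :: cs) none (some ((out.length : Nat) : Int))
            ++ [(PySem.List.pyGet? (out ++ c :: cs) ((out.length : Nat) : Int)).getD ' ']
            ++ PySem.List.slice (out ++ c :: cs) (some ((out.length : Nat) : Int)) (some ((out.length : Nat) : Int))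
            ++ PySem.List.slice (out ++ c :: cs) (some (((out.length : Nat) : Int) + 1)) none,
            (0 : Int) - (((out.length : Nat) : Int) - ((out.length : Nat) : Int))) = (out ++ c :: cs, 0)
        rw [PySem.List.slice_to_natCast, List.take_left, pyGet_mid]
        rw [PySem.List.slice_natCast]
        rw [show ((out.length : Nat) : Int) + 1 = ((out.length + 1 : Nat) : Int) by push_cast; ring]
        rw [PySem.List.slice_from_natCast]
        rw [List.drop_length_add_append (i := 1) (l₁ := out) (l₂ := c :: cs)]
        simp
      rw [minIntegerLoop, hbody, if_pos rfl, goB_not _ _ _ (by simp)]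
    · -- k > 0
      have hscan : minIntegerScanRes ((out.length + (c :: cs).length : Nat) : Int)
          (out ++ c :: cs) k (out.length : Int)
          = ((cs.take k.toNat).foldl min c,
             (out.length : Int) + (List.idxOf ((cs.take k.toNat).foldl min c) (c :: cs.take k.toNat) : Nat)) := by
        unfold minIntegerScanRes
        rw [pyGet_mid]
        have hb : min ((out.length + (c :: cs).length : Nat) : Int) ((out.length : Int) + k + 1)
            = (((out ++ [c]).length : Nat) : Int) + ((cs.take k.toNat).length : Int) := by
          simp [List.length_take]
          omega
        rw [hb]
        have hsp : out ++ c :: cs = (out ++ [c]) ++ (cs.take k.toNat ++ cs.drop k.toNat) := by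
          simp
        rw [show (out.length : Int) + 1 = ((out ++ [c]).length : Int) by simp] at *
        rw [hsp, scanA]
        rw [lmin2_char]
        have hle := foldl_min_le_init (cs.take k.toNat) c
        by_cases hlt : (cs.take k.toNat).foldl min c < c
        · rw [if_pos (by simpa using hlt)]
          rw [List.idxOf_cons_ne _ (fun hc => absurd hc.symm (ne_of_lt hlt))]
          refine Prod.ext (by simp) ?_
          simp
          ring
        · have heq : (cs.take k.toNat).foldl min c = c := le_antisymm hle (not_lt.1 hlt)
          rw [if_neg (by simpa using hlt)]
          rw [heq, List.idxOf_cons_self]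
          simp
      set ds := cs.take k.toNat with hds
      set m := ds.foldl min c with hm
      set w := c :: ds with hw
      set J := List.idxOf m w with hJdef
      have hminw : PySem.List.min? w (fun y => y) = some m := by
        rw [hw, hm]; exact PySem.List.min?_id_cons c _
      have hmem : m ∈ w := PySem.List.min?_mem hminw
      have hJw : J < w.length := List.idxOf_lt_length_iff.mpr hmem
      have hwlen : w.length = ds.length + 1 := by rw [hw]; rfl
      have hdsl : ds.length ≤ k.toNat := by rw [hds]; simp [List.length_take]
      have hdsc : ds.length ≤ cs.length := by rw [hds]; simp [List.length_take]
      have hJcs : J < (c :: cs).length := by simp; omega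
      have hvw : w = (c :: cs).take (k.toNat + 1) := by rw [hw, hds, List.take_succ_cons]
      have hval : (c :: cs)[J]'hJcs = m := by
        have h1 : w[J]'hJw = m := List.getElem_idxOf hJw
        have h2 : w[J]'hJw = ((c :: cs).take (k.toNat + 1))[J]'(hvw ▸ hJw) :=
          List.getElem_of_eq hvw hJw
        have h3 : ((c :: cs).take (k.toNat + 1))[J]'(hvw ▸ hJw) = (c :: cs)[J]'hJcs :=
          List.getElem_take
        rw [← h3, ← h2, h1]
      have hbody : minIntegerBody ((out.length + (c :: cs).length : Nat) : Int)
          (out ++ c :: cs) k (out.length : Int)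
          = ((out ++ [m]) ++ (c :: cs).eraseIdx J, k - (J : Nat)) := by
        unfold minIntegerBody
        rw [hscan]
        rw [if_pos (by push_cast; omega)]
        show (PySem.List.slice (out ++ c :: cs) none (some ((out.length : Nat) : Int))
            ++ [(PySem.List.pyGet? (out ++ c :: cs) ((out.length : Int) + (J : Nat))).getD ' ']
            ++ PySem.List.slice (out ++ c :: cs) (some ((out.length : Nat) : Int)) (some ((out.length : Int) + (J : Nat)))
            ++ PySem.List.slice (out ++ c :: cs) (some (((out.length : Int) + (J : Nat)) + 1)) none,
            k - (((out.length : Int) + (J : Nat)) - ((out.length : Nat) : Int)))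
            = ((out ++ [m]) ++ (c :: cs).eraseIdx J, k - (J : Nat))
        rw [PySem.List.slice_to_natCast, List.take_left]
        rw [show (out.length : Int) + (J : Int) = ((out.length + J : Nat) : Int) by push_cast; ring]
        rw [pyGet_abs out (c :: cs) J (by simpa using hJcs)]
        rw [PySem.List.slice_natCast]
        rw [show ((out.length + J : Nat) : Int) + 1 = ((out.length + (J + 1) : Nat) : Int) by push_cast; ring]
        rw [PySem.List.slice_from_natCast]
        rw [List.drop_length_add_append (i := J + 1) (l₁ := out) (l₂ := c :: cs)]
        rw [hval]
        rw [List.eraseIdx_eq_take_drop_succ]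
        refine Prod.ext ?_ (by simp)
        simp
      rw [minIntegerLoop, hbody, goB_step c cs out k hk]
      by_cases h0 : k - ((J : Nat) : Int) = 0
      · show (if k - ((J : Nat) : Int) = 0 then (out ++ [m]) ++ (c :: cs).eraseIdx J
            else minIntegerLoop _ ((out ++ [m]) ++ (c :: cs).eraseIdx J) (k - (J : Nat)) _ fuel) = _
        rw [if_pos h0, goB_not _ _ _ (by rw [h0]; simp)]
      · show (if k - ((J : Nat) : Int) = 0 then (out ++ [m]) ++ (c :: cs).eraseIdx J
            else minIntegerLoop _ ((out ++ [m]) ++ (c :: cs).eraseIdx J) (k - (J : Nat)) _ fuel) = _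
        rw [if_neg h0]
        have hlen' : ((c :: cs).eraseIdx J).length = fuel := by
          rw [List.length_eraseIdx]
          simp only [List.length_cons]
          rw [if_pos (by simpa using hJcs)]
          omega
        have hIH := ih ((c :: cs).eraseIdx J) (out ++ [m]) (k - (J : Nat)) hlen'
        have hn : (((out ++ [m]).length + ((c :: cs).eraseIdx J).length : Nat) : Int)
            = ((out.length + (c :: cs).length : Nat) : Int) := by
          have he : ((c :: cs).eraseIdx J).length = cs.length := by
            rw [List.length_eraseIdx, if_pos (by simpa using hJcs)]
            simp
          rw [he]
          simp
          omega
        have hi : (((out ++ [m]).length : Nat) : Int) = (out.length : Int) + 1 := by simp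
        rw [hn, hi] at hIH
        exact hIH

-- ---- B's queue machine equals pvGoB ----

-- remaining original indices, ascending
def pvRem (cs : List Char) (removed : List Int) : List Int :=
  (PySem.List.pyRange 0 (cs.length : Int) 1).filter (fun i => !(removed.contains i))

-- the queues state: per character code, the remaining indices holding that character
def pvQs (cs : List Char) (removed : List Int) : List (List Int) :=
  (List.range 128).map (fun c => (pvRem cs removed).filter (fun i => (altAt cs i).toNat == c))

def pvInv (cs : List Char) (removed : List Int) : Prop :=
  removed.Nodup ∧ ∀ r ∈ removed, 0 ≤ r ∧ r < (cs.length : Int)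

-- the flush after the while loop
def pvFinish (cs : List Char) (r : List Int × List Char) : List Char :=
  if (r.2.length : Int) < (cs.length : Int) then
    r.2 ++ ((PySem.List.pyRange 0 (cs.length : Int) 1).filter
      (fun i => !(PySem.Set.contains (PySem.Set.ofList r.1) i))).map (fun i => altAt cs i)
  else r.2

lemma pvRem_pairwise (cs : List Char) (removed : List Int) : (pvRem cs removed).Pairwise (· < ·) := by
  exact (PySem.List.pairwise_lt_pyRange_one 0 (cs.length : Int)).filter _

lemma mem_pvRem {cs : List Char} {removed : List Int} {i : Int} :
    i ∈ pvRem cs removed ↔ (0 ≤ i ∧ i < (cs.length : Int)) ∧ i ∉ removed := by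
  unfold pvRem
  rw [List.mem_filter, PySem.List.mem_pyRange_one]
  simp

lemma pvFilter_split (l : List Int) (p q : Int → Bool) :
    (l.filter q).length = (l.filter (fun a => p a && q a)).length + (l.filter (fun a => !p a && q a)).length := by
  induction l with
  | nil => simp
  | cons a l ih =>
    by_cases hp : p a <;> by_cases hq : q a <;> simp [hp, hq, ih] <;> omega

lemma pvLen_eq_of_mem_iff (l1 l2 : List Int) (h1 : l1.Nodup) (h2 : l2.Nodup)
    (hm : ∀ x, x ∈ l1 ↔ x ∈ l2) : l1.length = l2.length := by
  have h : l1.toFinset = l2.toFinset := by ext x; simp [hm]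
  rw [← List.toFinset_card_of_nodup h1, ← List.toFinset_card_of_nodup h2, h]

lemma pvCount (cs : List Char) (removed : List Int) (x : Int)
    (hinv : pvInv cs removed) (h0 : 0 ≤ x) (hn : x ≤ (cs.length : Int)) :
    ((removed.filter (fun r => decide (r < x))).length : Int)
      + (((pvRem cs removed).filter (fun r => decide (r < x))).length : Int) = x := by
  obtain ⟨hnd, hbd⟩ := hinv
  -- the base range counts x elements below x
  have hsplit : PySem.List.pyRange 0 (cs.length : Int) 1
      = PySem.List.pyRange 0 x 1 ++ PySem.List.pyRange x (cs.length : Int) 1 :=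
    PySem.List.pyRange_one_append 0 x (cs.length : Int) h0 hn
  have hbase : ((PySem.List.pyRange 0 (cs.length : Int) 1).filter (fun r => decide (r < x))).length = x.toNat := by
    rw [hsplit, List.filter_append]
    have hA : (PySem.List.pyRange 0 x 1).filter (fun r => decide (r < x)) = PySem.List.pyRange 0 x 1 :=
      List.filter_eq_self.mpr (by
        intro a ha
        have := (PySem.List.mem_pyRange_one).mp ha
        simp; omega)
    have hB : (PySem.List.pyRange x (cs.length : Int) 1).filter (fun r => decide (r < x)) = [] := by
      apply List.filter_eq_nil_iff.mpr
      intro a ha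
      have := (PySem.List.mem_pyRange_one).mp ha
      simp; omega
    rw [hA, hB, List.append_nil, PySem.List.length_pyRange_one]
    omega
  -- split that count by membership in removed
  have hsp := pvFilter_split (PySem.List.pyRange 0 (cs.length : Int) 1)
      (fun r => removed.contains r) (fun r => decide (r < x))
  -- the contained part has the length of removed.filter (< x)
  have hrem : ((PySem.List.pyRange 0 (cs.length : Int) 1).filter
        (fun a => removed.contains a && decide (a < x))).length
      = (removed.filter (fun r => decide (r < x))).length := by
    apply pvLen_eq_of_mem_iff
    · exact ((PySem.List.nodup_pyRange_one 0 (cs.length : Int)).filter _)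
    · exact hnd.filter _
    · intro y
      simp only [List.mem_filter, PySem.List.mem_pyRange_one, Bool.and_eq_true, decide_eq_true_eq,
        List.contains_iff_mem]
      constructor
      · rintro ⟨-, hy, hxy⟩; exact ⟨hy, hxy⟩
      · rintro ⟨hy, hxy⟩; exact ⟨hbd y hy, hy, hxy⟩
  -- the non-contained part is pvRem's count
  have hrm : (PySem.List.pyRange 0 (cs.length : Int) 1).filter
        (fun a => !removed.contains a && decide (a < x))
      = (pvRem cs removed).filter (fun r => decide (r < x)) := by
    unfold pvRem
    rw [List.filter_filter]
    apply List.filter_congr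
    intro a _
    cases h1 : removed.contains a <;> cases h2 : decide (a < x) <;> simp [h1, h2]
  rw [hbase] at hsp
  rw [hrem] at hsp
  rw [hrm] at hsp
  omega

lemma pvSorted_filter_lt : ∀ (L : List Int), L.Pairwise (· < ·) → ∀ (j : Nat) (hj : j < L.length),
    L.filter (fun y => decide (y < L[j])) = L.take j := by
  intro L
  induction L with
  | nil => intro _ j hj; simp at hj
  | cons a L ih =>
    intro hp j hj
    have ha : ∀ b ∈ L, a < b := (List.pairwise_cons.mp hp).1
    have hL : L.Pairwise (· < ·) := (List.pairwise_cons.mp hp).2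
    cases j with
    | zero =>
      simp only [List.getElem_cons_zero, List.take_zero]
      apply List.filter_eq_nil_iff.mpr
      intro b hb
      rcases List.mem_cons.mp hb with rfl | hb'
      · simp
      · have := ha b hb'; simp; omega
    | succ j =>
      have hjL : j < L.length := by simpa using hj
      simp only [List.getElem_cons_succ, List.take_succ_cons]
      rw [List.filter_cons]
      have hja : a < L[j] := ha _ (List.getElem_mem hjL)
      rw [if_pos (by simpa using hja)]
      exact congrArg (List.cons a) (ih hL j hjL)

lemma pvSorted_filter_ne : ∀ (L : List Int), L.Pairwise (· < ·) → ∀ (j : Nat) (hj : j < L.length),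
    L.filter (fun y => !(y == L[j])) = L.eraseIdx j := by
  intro L
  induction L with
  | nil => intro _ j hj; simp at hj
  | cons a L ih =>
    intro hp j hj
    have ha : ∀ b ∈ L, a < b := (List.pairwise_cons.mp hp).1
    have hL : L.Pairwise (· < ·) := (List.pairwise_cons.mp hp).2
    cases j with
    | zero =>
      simp only [List.getElem_cons_zero, List.eraseIdx_cons_zero]
      rw [List.filter_cons, if_neg (by simp)]
      apply List.filter_eq_self.mpr
      intro b hb
      have := ha b hb; simp; omega
    | succ j =>
      have hjL : j < L.length := by simpa using hj
      simp only [List.getElem_cons_succ, List.eraseIdx_cons_succ]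
      rw [List.filter_cons]
      have hja : a < L[j] := ha _ (List.getElem_mem hjL)
      rw [if_pos (by simp; omega)]
      exact congrArg (List.cons a) (ih hL j hjL)

lemma pvModify_map_range {α : Type} (n i : Nat) (g : Nat → α) (f : α → α) (hi : i < n) :
    ((List.range n).map g).modify i f
      = (List.range n).map (fun c => if c = i then f (g c) else g c) := by
  apply List.ext_getElem
  · simp [List.length_modify]
  · intro j hj1 hj2
    have hjn : j < n := by simpa [List.length_modify] using hj1
    rw [List.getElem_modify]
    simp only [List.getElem_map, List.getElem_range]
    by_cases h : i = j
    · subst h; simp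
    · rw [if_neg h, if_neg (fun hc => h hc.symm)]

lemma pvAt_nat (cs : List Char) (m : Nat) (hm : m < cs.length) :
    altAt cs (m : Int) = cs[m] := by
  unfold altAt
  rw [PySem.List.pyGet?_natCast]
  simp [hm]

lemma pvAt_mem {cs : List Char} {i : Int} (h0 : 0 ≤ i) (hn : i < (cs.length : Int)) :
    altAt cs i ∈ cs := by
  have : i = ((i.toNat : Nat) : Int) := by omega
  rw [this, pvAt_nat cs i.toNat (by omega)]
  exact List.getElem_mem _

lemma pvBuildAux (cs : List Char) (hch : ∀ c ∈ cs, c.toNat < 128) :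
    ∀ (m : Nat), m ≤ cs.length →
    (PySem.List.pyRange 0 (m : Int) 1).foldl
        (fun qs i => qs.modify (altAt cs i).toNat (fun q => q ++ [i]))
        (List.replicate 128 [])
      = (List.range 128).map (fun c => (PySem.List.pyRange 0 (m : Int) 1).filter
          (fun i => (altAt cs i).toNat == c)) := by
  intro m
  induction m with
  | zero =>
    intro _
    rw [PySem.List.pyRange_one_eq_nil (by omega)]
    simp [List.map_const']
  | succ m ih =>
    intro hm
    have hsucc : ((m + 1 : Nat) : Int) = (m : Int) + 1 := by push_cast; ring
    rw [hsucc, PySem.List.pyRange_one_succ_right (by omega), List.foldl_append, List.foldl_cons,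
      List.foldl_nil, ih (by omega)]
    have hcm : (altAt cs (m : Int)).toNat < 128 := by
      rw [pvAt_nat cs m (by omega)]
      exact hch _ (List.getElem_mem _)
    rw [pvModify_map_range 128 (altAt cs (m : Int)).toNat _ _ hcm]
    apply List.map_congr_left
    intro c hc
    rw [List.filter_append]
    by_cases h : c = (altAt cs (m : Int)).toNat
    · rw [if_pos h]
      have hf : List.filter (fun i => (altAt cs i).toNat == c) [(m : Int)] = [(m : Int)] := by
        simp [h]
      rw [hf]
    · rw [if_neg h]
      have hf : List.filter (fun i => (altAt cs i).toNat == c) [(m : Int)] = [] := by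
        simp
        intro hc2
        exact absurd hc2.symm h
      rw [hf, List.append_nil]

lemma pvBuild (cs : List Char) (hch : ∀ c ∈ cs, c.toNat < 128) :
    altBuild cs = pvQs cs [] := by
  unfold altBuild pvQs
  rw [pvBuildAux cs hch cs.length (le_refl _)]
  have : pvRem cs [] = PySem.List.pyRange 0 (cs.length : Int) 1 := by
    unfold pvRem
    apply List.filter_eq_self.mpr
    intro a _
    simp
  rw [this]

lemma pvChar_lt (a b : Char) : a < b ↔ a.toNat < b.toNat := by
  rw [Char.lt_def, UInt32.lt_iff_toNat_lt]; rfl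

lemma pvChar_eq_of_toNat {a b : Char} (h : a.toNat = b.toNat) : a = b := by
  rw [← Char.ofNat_toNat a, ← Char.ofNat_toNat b, h]

lemma pvSet_contains (l : List Int) (i : Int) :
    PySem.Set.contains (PySem.Set.ofList l) i = l.contains i := by
  by_cases h : i ∈ l
  · simp [PySem.Set.contains, PySem.Set.mem_ofList, h]
  · simp [PySem.Set.contains, PySem.Set.mem_ofList, h]

lemma pvQs_get (cs : List Char) (removed : List Int) (c : Nat) (hc : c < 128) :
    (PySem.List.pyGet? (pvQs cs removed) ((c : Nat) : Int)).getD []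
      = (pvRem cs removed).filter (fun i => (altAt cs i).toNat == c) := by
  unfold pvQs
  rw [PySem.List.pyGet?_natCast]
  simp [List.getElem?_map, hc]

lemma pvCost (cs : List Char) (removed : List Int) (hinv : pvInv cs removed)
    (p : Nat) (hp : p < (pvRem cs removed).length) :
    (pvRem cs removed)[p] - ((removed.filter (fun r => decide (r < (pvRem cs removed)[p]))).length : Int)
      = (p : Int) := by
  have hmem : (pvRem cs removed)[p] ∈ pvRem cs removed := List.getElem_mem hp
  have hb := (mem_pvRem.mp hmem).1
  have hcnt := pvCount cs removed ((pvRem cs removed)[p]) hinv hb.1 (le_of_lt hb.2)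
  rw [pvSorted_filter_lt (pvRem cs removed) (pvRem_pairwise cs removed) p hp] at hcnt
  have hlt : ((pvRem cs removed).take p).length = p := by
    simp [List.length_take]
    omega
  rw [hlt] at hcnt
  omega

lemma pvTake_mem (L : List Int) (J : Nat) (b : Int) (h : b ∈ L.take J) :
    ∃ (p : Nat) (hp : p < L.length), p < J ∧ L[p] = b := by
  rw [List.mem_take_iff_getElem] at h
  obtain ⟨i, hi, he⟩ := h
  exact ⟨i, by omega, by omega, he⟩

-- the head of the queue of m's code is the J-th remaining index
lemma pvQueueHead (cs : List Char) (removed : List Int) (m : Char) (J : Nat)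
    (hJR : J < (pvRem cs removed).length)
    (hval : altAt cs ((pvRem cs removed)[J]) = m)
    (hfirst : ∀ (p : Nat) (hp : p < (pvRem cs removed).length), p < J → altAt cs ((pvRem cs removed)[p]) ≠ m) :
    (pvRem cs removed).filter (fun i => (altAt cs i).toNat == m.toNat)
      = (pvRem cs removed)[J] :: ((pvRem cs removed).drop (J+1)).filter (fun i => (altAt cs i).toNat == m.toNat) := by
  have hdec : (pvRem cs removed).take J ++ (pvRem cs removed)[J] :: (pvRem cs removed).drop (J+1)
      = pvRem cs removed := by
    rw [List.getElem_cons_drop, List.take_append_drop]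
  conv_lhs => rw [← hdec]
  rw [List.filter_append, List.filter_cons]
  have h1 : ((pvRem cs removed).take J).filter (fun i => (altAt cs i).toNat == m.toNat) = [] := by
    apply List.filter_eq_nil_iff.mpr
    intro b hb
    obtain ⟨p, hp, hpJ, rfl⟩ := pvTake_mem _ _ _ hb
    simp only [beq_iff_eq, decide_eq_true_eq]
    intro heq
    exact hfirst p hp hpJ (pvChar_eq_of_toNat heq)
  rw [h1, if_pos (by simp [hval])]
  simp

lemma pvScan (cs : List Char) (removed : List Int) (k : Int)
    (hinv : pvInv cs removed)
    (m : Char) (J : Nat)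
    (hm128 : m.toNat < 128)
    (hJR : J < (pvRem cs removed).length)
    (hval : altAt cs ((pvRem cs removed)[J]) = m)
    (hfirst : ∀ (p : Nat) (hp : p < (pvRem cs removed).length), p < J → altAt cs ((pvRem cs removed)[p]) ≠ m)
    (hJk : (J : Int) ≤ k)
    (hmin : ∀ (p : Nat) (hp : p < (pvRem cs removed).length), (p : Int) ≤ k → ¬ (altAt cs ((pvRem cs removed)[p]) < m)) :
    ∀ (d c0 : Nat), c0 + d = m.toNat →
    altScan (pvQs cs removed) removed k (PySem.List.pyRange ((c0 : Nat) : Int) 128 1)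
      = some (((m.toNat : Nat) : Int), (pvRem cs removed)[J], (J : Int)) := by
  intro d
  induction d with
  | zero =>
    intro c0 hc0
    have hc0m : c0 = m.toNat := by omega
    subst hc0m
    rw [PySem.List.pyRange_one_cons (by exact_mod_cast hm128)]
    simp only [altScan]
    rw [pvQs_get cs removed m.toNat hm128]
    rw [pvQueueHead cs removed m J hJR hval hfirst]
    dsimp only
    have hcost := pvCost cs removed hinv J hJR
    have hle : ((removed.filter (fun r => decide (r < (pvRem cs removed)[J]))).length : Int)
        ≤ (removed.length : Int) := by
      exact_mod_cast List.length_filter_le _ removed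
    rw [if_neg (by omega)]
    rw [if_pos (by omega)]
    rw [hcost]
  | succ d ihd =>
    intro c0 hc0
    have hc0m : c0 < m.toNat := by omega
    rw [PySem.List.pyRange_one_cons (by push_cast; omega)]
    simp only [altScan]
    rw [pvQs_get cs removed c0 (by omega)]
    have hnext : ((c0 : Int) + 1) = (((c0 + 1 : Nat)) : Int) := by push_cast; ring
    cases hq : (pvRem cs removed).filter (fun i => (altAt cs i).toNat == c0) with
    | nil =>
      rw [hnext]
      exact ihd (c0 + 1) (by omega)
    | cons idx t =>
      dsimp only
      have hmemf : idx ∈ (pvRem cs removed).filter (fun i => (altAt cs i).toNat == c0) := by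
        rw [hq]; exact List.mem_cons_self
      obtain ⟨hmemR, hcode⟩ := List.mem_filter.mp hmemf
      have hcode' : (altAt cs idx).toNat = c0 := by simpa using hcode
      obtain ⟨p, hp, hpe⟩ := List.mem_iff_getElem.mp hmemR
      have hlt : altAt cs idx < m := (pvChar_lt _ _).mpr (by omega)
      have hpk : ¬ ((p : Int) ≤ k) := by
        intro hle
        exact hmin p hp hle (by rw [hpe]; exact hlt)
      have hcost : idx - ((removed.filter (fun r => decide (r < idx))).length : Int) = (p : Int) := by
        have := pvCost cs removed hinv p hp
        rw [hpe] at this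
        exact this
      by_cases hpre : k < idx - (removed.length : Int)
      · rw [if_pos hpre, hnext]
        exact ihd (c0 + 1) (by omega)
      · rw [if_neg hpre]
        rw [if_neg (by omega)]
        rw [hnext]
        exact ihd (c0 + 1) (by omega)

lemma pvStepRem (cs : List Char) (removed : List Int) (J : Nat)
    (hJ : J < (pvRem cs removed).length) :
    pvRem cs (removed ++ [(pvRem cs removed)[J]]) = (pvRem cs removed).eraseIdx J := by
  have key : ∀ x : Int, pvRem cs (removed ++ [x])
      = (pvRem cs removed).filter (fun y => !(y == x)) := by
    intro x
    unfold pvRem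
    rw [List.filter_filter]
    apply List.filter_congr
    intro a _
    by_cases h1 : a ∈ removed <;> by_cases h2 : a = x <;>
      simp [h1, h2, beq_eq_decide]
  rw [key, pvSorted_filter_ne (pvRem cs removed) (pvRem_pairwise cs removed) J hJ]

lemma pvStepQs (cs : List Char) (removed : List Int) (J : Nat)
    (hJ : J < (pvRem cs removed).length) (m : Char)
    (hval : altAt cs ((pvRem cs removed)[J]) = m)
    (hm128 : m.toNat < 128)
    (hfirst : ∀ (p : Nat) (hp : p < (pvRem cs removed).length), p < J →
      altAt cs ((pvRem cs removed)[p]) ≠ m) :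
    (pvQs cs removed).modify m.toNat List.tail
      = pvQs cs (removed ++ [(pvRem cs removed)[J]]) := by
  unfold pvQs
  rw [pvStepRem cs removed J hJ]
  rw [pvModify_map_range 128 _ _ _ hm128]
  apply List.map_congr_left
  intro c hc
  have hdec : (pvRem cs removed).take J ++ (pvRem cs removed)[J] :: (pvRem cs removed).drop (J+1)
      = pvRem cs removed := by
    rw [List.getElem_cons_drop, List.take_append_drop]
  rw [List.eraseIdx_eq_take_drop_succ]
  by_cases h : c = m.toNat
  · rw [if_pos h]
    subst h
    rw [pvQueueHead cs removed m J hJ hval hfirst]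
    rw [List.filter_append]
    have h1 : ((pvRem cs removed).take J).filter
        (fun i => (altAt cs i).toNat == m.toNat) = [] := by
      apply List.filter_eq_nil_iff.mpr
      intro b hb
      obtain ⟨p, hp, hpJ, rfl⟩ := pvTake_mem _ _ _ hb
      simp only [beq_iff_eq]
      intro hcontra
      exact hfirst p hp hpJ (pvChar_eq_of_toNat hcontra)
    rw [h1, List.tail_cons, List.nil_append]
  · rw [if_neg h]
    conv_lhs => rw [← hdec]
    rw [List.filter_append, List.filter_append, List.filter_cons]
    rw [if_neg (by rw [hval]; simp; intro hcontra; exact h hcontra.symm)]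

theorem pvB_corr : ∀ (fuel : Nat) (cs : List Char) (removed : List Int) (out : List Char) (k : Int),
    (∀ c ∈ cs, c.toNat < 128) → pvInv cs removed →
    (pvRem cs removed).length ≤ fuel →
    out.length + (pvRem cs removed).length = cs.length →
    pvFinish cs (altLoop (cs.length : Int) fuel (pvQs cs removed) removed out k)
      = pvGoB ((pvRem cs removed).map (altAt cs)) k out := by
  intro fuel
  induction fuel with
  | zero =>
    intro cs removed out k hch hinv hfuel hlen
    have hR : pvRem cs removed = [] := List.eq_nil_of_length_eq_zero (by omega)
    rw [hR] at hlen
    have hout : out.length = cs.length := by simpa using hlen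
    rw [hR]
    simp only [altLoop]
    unfold pvFinish
    dsimp only
    rw [if_neg (by omega)]
    rw [goB_not _ _ _ (by simp)]
    simp
  | succ fuel ih =>
    intro cs removed out k hch hinv hfuel hlen
    by_cases hcond : (out.length : Int) < (cs.length : Int) ∧ 0 < k
    · obtain ⟨houtlt, hk⟩ := hcond
      have hRlen : 0 < (pvRem cs removed).length := by
        have : out.length < cs.length := by exact_mod_cast houtlt
        omega
      obtain ⟨c, cs', hrest⟩ : ∃ c cs', (pvRem cs removed).map (altAt cs) = c :: cs' := by
        cases hv : (pvRem cs removed).map (altAt cs) with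
        | nil => rw [List.map_eq_nil_iff] at hv; rw [hv] at hRlen; simp at hRlen
        | cons c cs' => exact ⟨c, cs', rfl⟩
      have hrestlen : (c :: cs').length = (pvRem cs removed).length := by
        rw [← hrest, List.length_map]
      set w := c :: cs'.take k.toNat with hw
      set m := (cs'.take k.toNat).foldl min c with hm
      set J := List.idxOf m w with hJdef
      have hwtake : w = (c :: cs').take (k.toNat + 1) := by rw [hw, List.take_succ_cons]
      have hminw : PySem.List.min? w (fun y => y) = some m := by
        rw [hw, hm]; exact PySem.List.min?_id_cons c _
      have hmemw : m ∈ w := PySem.List.min?_mem hminw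
      have hwlen : w.length ≤ k.toNat + 1 := by
        rw [hw]; simp [List.length_take]
      have hwlenr : w.length ≤ (c :: cs').length := by
        rw [hwtake]; simp [List.length_take]
      have hidx : PySem.List.index? w m = some J := by
        rw [PySem.List.index?_eq_idxOf?, idxOf?_mem hmemw]
      obtain ⟨hJw, hwJ, hwbefore⟩ := PySem.List.getElem_of_index?_eq_some hidx
      have hJR : J < (pvRem cs removed).length := by omega
      have hJrest : J < (c :: cs').length := by omega
      -- transfer w facts to rest / pvRem
      have hwget : ∀ (p : Nat) (hp : p < w.length), w[p] = (c :: cs')[p]'(by omega) := by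
        intro p hp
        have : w[p] = ((c :: cs').take (k.toNat + 1))[p]'(by rw [← hwtake]; exact hp) :=
          List.getElem_of_eq hwtake hp
        rw [this, List.getElem_take]
      have hrestget : ∀ (p : Nat) (hp : p < (pvRem cs removed).length),
          (c :: cs')[p]'(by omega) = altAt cs ((pvRem cs removed)[p]) := by
        intro p hp
        have hp' : p < (c :: cs').length := by omega
        have h2 : (c :: cs')[p]? = some (altAt cs ((pvRem cs removed)[p])) := by
          rw [← hrest, List.getElem?_map, List.getElem?_eq_getElem hp]
          rfl
        have h3 := List.getElem?_eq_getElem hp'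
        rw [h2] at h3
        exact (Option.some.inj h3).symm
      have hval : altAt cs ((pvRem cs removed)[J]) = m := by
        rw [← hrestget J hJR, ← hwget J hJw, hwJ]
      have hfirst : ∀ (p : Nat) (hp : p < (pvRem cs removed).length), p < J →
          altAt cs ((pvRem cs removed)[p]) ≠ m := by
        intro p hp hpJ
        rw [← hrestget p hp, ← hwget p (by omega)]
        exact hwbefore p hpJ
      have hktoNat : ((k.toNat : Nat) : Int) = k := by omega
      have hJk : (J : Int) ≤ k := by
        have : J ≤ k.toNat := by omega
        omega
      have hmin : ∀ (p : Nat) (hp : p < (pvRem cs removed).length), (p : Int) ≤ k →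
          ¬ (altAt cs ((pvRem cs removed)[p]) < m) := by
        intro p hp hpk
        have hwlen2 : w.length = min (k.toNat + 1) (c :: cs').length := by
          rw [hwtake, List.length_take]
        have hpw : p < w.length := by
          rw [hwlen2]
          omega
        rw [← hrestget p hp, ← hwget p hpw]
        exact not_lt.mpr (PySem.List.min?_isMin hminw _ (List.getElem_mem hpw))
      have hmcs : m ∈ cs := by
        have hmrest : m ∈ (c :: cs') := by rw [hwtake] at hmemw; exact List.mem_of_mem_take hmemw
        rw [← hrest] at hmrest
        obtain ⟨a, ha, he⟩ := List.mem_map.mp hmrest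
        have hb := (mem_pvRem.mp ha).1
        rw [← he]
        exact pvAt_mem hb.1 hb.2
      have hm128 : m.toNat < 128 := hch m hmcs
      have hscan := pvScan cs removed k hinv m J hm128 hJR hval hfirst hJk hmin m.toNat 0 (by omega)
      -- one loop step
      simp only [altLoop]
      rw [if_pos ⟨houtlt, hk⟩]
      have hscan' : altScan (pvQs cs removed) removed k (PySem.List.pyRange 0 128 1)
          = some (((m.toNat : Nat) : Int), (pvRem cs removed)[J], (J : Int)) := by
        rw [show (0 : Int) = ((0 : Nat) : Int) by simp]
        exact hscan
      rw [hscan']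
      dsimp only
      have htoNat : (((m.toNat : Nat) : Int)).toNat = m.toNat := Int.toNat_natCast m.toNat
      rw [htoNat, Char.ofNat_toNat]
      rw [pvStepQs cs removed J hJR m hval hm128 hfirst]
      -- invariant for the new state
      have hmemR : (pvRem cs removed)[J] ∈ pvRem cs removed := List.getElem_mem hJR
      have hbnd := (mem_pvRem.mp hmemR).1
      have hnotin := (mem_pvRem.mp hmemR).2
      have hinv' : pvInv cs (removed ++ [(pvRem cs removed)[J]]) := by
        obtain ⟨hnd, hbd⟩ := hinv
        constructor
        · rw [List.nodup_append]
          refine ⟨hnd, List.nodup_singleton _, ?_⟩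
          intro a ha b hb
          rw [List.mem_singleton] at hb
          subst hb
          exact fun hco => hnotin (hco ▸ ha)
        · intro r hr
          rcases List.mem_append.mp hr with hr | hr
          · exact hbd r hr
          · rw [List.mem_singleton] at hr; subst hr; exact hbnd
      have hrem' := pvStepRem cs removed J hJR
      have hlen' : ((pvRem cs (removed ++ [(pvRem cs removed)[J]])).length) = (pvRem cs removed).length - 1 := by
        rw [hrem', List.length_eraseIdx_of_lt hJR]
      have hIH := ih cs (removed ++ [(pvRem cs removed)[J]]) (out ++ [m]) (k - (J : Int)) hch hinv'
        (by omega) (by simp; omega)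
      rw [hIH]
      -- pvGoB side
      rw [hrest, goB_step c cs' out k hk]
      rw [← hm, ← hw, ← hJdef]
      have hlist : (pvRem cs (removed ++ [(pvRem cs removed)[J]])).map (altAt cs)
          = (c :: cs').eraseIdx J := by
        rw [hrem', ← List.eraseIdx_map, hrest]
      rw [hlist]
    · simp only [altLoop]
      rw [if_neg hcond]
      have hgo : pvGoB ((pvRem cs removed).map (altAt cs)) k out = out ++ (pvRem cs removed).map (altAt cs) := by
        apply goB_not
        rintro ⟨hne, hkpos⟩
        apply hcond
        refine ⟨?_, hkpos⟩
        have h1 : (pvRem cs removed).length ≠ 0 := by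
          intro h0
          apply hne
          rw [List.eq_nil_of_length_eq_zero h0]
          rfl
        have : out.length < cs.length := by omega
        exact_mod_cast this
      rw [hgo]
      unfold pvFinish
      by_cases hout : (out.length : Int) < (cs.length : Int)
      · rw [if_pos hout]
        congr 1
        have hfc : (PySem.List.pyRange 0 (cs.length : Int) 1).filter
            (fun i => !(PySem.Set.contains (PySem.Set.ofList removed) i)) = pvRem cs removed := by
          unfold pvRem
          apply List.filter_congr
          intro a _
          rw [pvSet_contains]
        rw [hfc]
      · rw [if_neg hout]
        have hR : pvRem cs removed = [] := by
          apply List.eq_nil_of_length_eq_zero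
          have : ¬ (out.length < cs.length) := by
            intro hcon
            exact hout (by exact_mod_cast hcon)
          omega
        rw [hR]
        simp

-- ===== VERDICT (by name: the statement is the Claim_ definition above) =====
theorem minInteger_spec : Claim_equal_minInteger := by
  intro num k hdom
  unfold Spec_minInteger
  have hch : ∀ c ∈ num.toList, c.toNat < 128 := by
    intro c hc
    have hs : pvDomStr num = true := by
      unfold Dom_minInteger at hdom
      exact (Bool.and_eq_true _ _ |>.mp hdom).1
    unfold pvDomStr at hs
    have hpc := List.all_eq_true.mp hs c hc
    unfold pvDomChar at hpc
    simp at hpc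
    omega
  have hA : minInteger num k = String.ofList (pvGoB num.toList k []) := by
    unfold minInteger
    have h := main_corr num.toList.length num.toList [] k rfl
    simpa using congrArg String.ofList h
  rw [hA]
  by_cases hk : k ≤ 0
  · unfold minInteger_alt
    rw [if_pos hk]
    rw [goB_not _ _ _ (by rintro ⟨_, h⟩; omega)]
    simp
  · replace hk : 0 < k := by omega
    have hinv0 : pvInv num.toList [] := ⟨List.nodup_nil, by simp⟩
    have hrem0 : pvRem num.toList [] = PySem.List.pyRange 0 (num.toList.length : Int) 1 := by
      unfold pvRem
      exact List.filter_eq_self.mpr (by intro a _; simp)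
    have hlen0 : (pvRem num.toList []).length = num.toList.length := by
      rw [hrem0, PySem.List.length_pyRange_one]
      omega
    have hrest0 : (pvRem num.toList []).map (altAt num.toList) = num.toList := by
      rw [hrem0]
      exact PySem.List.map_pyGetD_pyRange_zero' num.toList ' '
    have hcorr := pvB_corr num.toList.length num.toList [] [] k hch hinv0 (by omega) (by simpa using hlen0)
    unfold minInteger_alt
    rw [if_neg (by omega)]
    rw [pvBuild num.toList hch]
    show String.ofList (pvGoB num.toList k []) =
      (if ((altLoop ((num.toList.length : Nat) : Int) num.toList.length (pvQs num.toList []) [] [] k).2.length : Int) < ((num.toList.length : Nat) : Int) then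
        String.ofList ((altLoop ((num.toList.length : Nat) : Int) num.toList.length (pvQs num.toList []) [] [] k).2 ++
          ((PySem.List.pyRange 0 ((num.toList.length : Nat) : Int) 1).filter
            (fun i => !(PySem.Set.contains (PySem.Set.ofList (altLoop ((num.toList.length : Nat) : Int) num.toList.length (pvQs num.toList []) [] [] k).1) i))).map
            (fun i => altAt num.toList i))
      else String.ofList (altLoop ((num.toList.length : Nat) : Int) num.toList.length (pvQs num.toList []) [] [] k).2)
    have hfin : (if ((altLoop ((num.toList.length : Nat) : Int) num.toList.length (pvQs num.toList []) [] [] k).2.length : Int) < ((num.toList.length : Nat) : Int) then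
        String.ofList ((altLoop ((num.toList.length : Nat) : Int) num.toList.length (pvQs num.toList []) [] [] k).2 ++
          ((PySem.List.pyRange 0 ((num.toList.length : Nat) : Int) 1).filter
            (fun i => !(PySem.Set.contains (PySem.Set.ofList (altLoop ((num.toList.length : Nat) : Int) num.toList.length (pvQs num.toList []) [] [] k).1) i))).map
            (fun i => altAt num.toList i))
      else String.ofList (altLoop ((num.toList.length : Nat) : Int) num.toList.length (pvQs num.toList []) [] [] k).2)
        = String.ofList (pvFinish num.toList (altLoop ((num.toList.length : Nat) : Int) num.toList.length (pvQs num.toList []) [] [] k)) := by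
      unfold pvFinish
      split <;> rfl
    rw [hfin, hcorr, hrest0]
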